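-- pv_equiv track=rewrite | github.com/lukegil/miscellaneous | advent-2020/day1/find-2020.py | split_numbers
-- ===== SOURCE A (Python) =====
-- MIDPOINT = 1010
--
-- def split_numbers(numbers):
--     lt_1010 = []
--     gt_1010 = []
--     eq_1010 = []
--
--     for num in numbers:
--         if num < MIDPOINT:
--             lt_1010.append(num)
--         elif num > MIDPOINT:
--             gt_1010.append(num)
--         else:
--             eq_1010.append(num)
--     return (lt_1010, eq_1010, gt_1010)
-- ===== SOURCE B (Python) =====
-- MIDPOINT = 1010
--
-- def split_numbers(numbers):
--     lt = [n for n in numbers if n < MIDPOINT]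
--     eq = [n for n in numbers if n == MIDPOINT]
--     gt = [n for n in numbers if n > MIDPOINT]
--     return (lt, eq, gt)
-- ===== Notes on version B (the rewrite author's own statement) =====
-- stated objective: simpler
-- what changed: Replaces the single accumulating loop with three branches by three independent filtering comprehensions over the input, one per bucket.
import Mathlib
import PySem

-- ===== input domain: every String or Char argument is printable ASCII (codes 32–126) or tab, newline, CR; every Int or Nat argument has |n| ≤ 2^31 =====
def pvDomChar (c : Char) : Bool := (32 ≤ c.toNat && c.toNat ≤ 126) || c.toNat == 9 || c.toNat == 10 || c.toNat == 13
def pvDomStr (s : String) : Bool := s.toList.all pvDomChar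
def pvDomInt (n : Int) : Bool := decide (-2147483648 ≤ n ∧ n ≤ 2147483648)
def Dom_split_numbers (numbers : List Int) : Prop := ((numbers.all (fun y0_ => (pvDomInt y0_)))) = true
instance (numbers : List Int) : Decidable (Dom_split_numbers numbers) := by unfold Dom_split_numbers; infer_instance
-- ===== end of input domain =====

-- B replaces A's single three-branch accumulating loop by three independent filters (objective: simpler).

-- ===== PORT A =====
-- the constant MIDPOINT = 1010
def pvMidpoint : Int := 1010

-- A's single loop over `numbers`, appending to one of three accumulators
def split_numbers (numbers : List Int) : List Int × List Int × List Int :=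
  let st := numbers.foldl
    (fun (acc : List Int × List Int × List Int) num =>
      let (lt_1010, gt_1010, eq_1010) := acc
      if num < pvMidpoint then (lt_1010 ++ [num], gt_1010, eq_1010)
      else if num > pvMidpoint then (lt_1010, gt_1010 ++ [num], eq_1010)
      else (lt_1010, gt_1010, eq_1010 ++ [num]))
    ([], [], [])
  (st.1, st.2.2, st.2.1)

-- ===== PORT B =====
def split_numbers_alt (numbers : List Int) : List Int × List Int × List Int :=
  (numbers.filter (fun n => n < pvMidpoint),
   numbers.filter (fun n => n == pvMidpoint),
   numbers.filter (fun n => n > pvMidpoint))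

-- ===== PRECONDITION & SPEC =====
def Spec_split_numbers (numbers : List Int) (out : List Int × List Int × List Int) : Prop := out = split_numbers_alt numbers
instance (numbers : List Int) (out : List Int × List Int × List Int) : Decidable (Spec_split_numbers numbers out) := by unfold Spec_split_numbers; infer_instance

-- ===== CLAIM (what is proved, stated in full; the proofs are below) =====
def Claim_equal_split_numbers : Prop := ∀ (numbers : List Int), Dom_split_numbers numbers → Spec_split_numbers numbers (split_numbers numbers)

-- ===== LEMMAS AND PROOFS =====

-- loop invariant: folding from state (l,g,e) yields the filters appended to each accumulator
lemma split_numbers_foldl (numbers : List Int) (l g e : List Int) :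
    numbers.foldl
      (fun (acc : List Int × List Int × List Int) num =>
        let (lt_1010, gt_1010, eq_1010) := acc
        if num < pvMidpoint then (lt_1010 ++ [num], gt_1010, eq_1010)
        else if num > pvMidpoint then (lt_1010, gt_1010 ++ [num], eq_1010)
        else (lt_1010, gt_1010, eq_1010 ++ [num]))
      (l, g, e)
    = (l ++ numbers.filter (fun n => n < pvMidpoint),
       g ++ numbers.filter (fun n => n > pvMidpoint),
       e ++ numbers.filter (fun n => n == pvMidpoint)) := by
  induction numbers generalizing l g e with
  | nil => simp
  | cons x xs ih =>
    simp only [List.foldl_cons, List.filter_cons]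
    by_cases h1 : x < pvMidpoint
    · have h2 : ¬ x > pvMidpoint := by omega
      have h3 : ¬ (x == pvMidpoint) = true := by simp; omega
      simp [h1, h2, h3, ih]
    · by_cases h2 : x > pvMidpoint
      · have h3 : ¬ (x == pvMidpoint) = true := by simp; omega
        simp [h1, h2, h3, ih]
      · have h3 : (x == pvMidpoint) = true := by simp; omega
        simp [h1, h2, h3, ih]

-- ===== VERDICT (by name: the statement is the Claim_ definition above) =====
theorem split_numbers_spec : Claim_equal_split_numbers := by
  intro numbers _
  unfold Spec_split_numbers split_numbers split_numbers_alt
  simp [split_numbers_foldl]
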